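-- pv_equiv track=rewrite | github.com/Yacinetetah/norinori-puzzle | Norinori/clauses.py | au_moins_deux_case
-- ===== SOURCE A (Python) =====
-- def au_moins_deux_case(region):
--     #On va prendre n-1 element de la région pour voir s'il y a au moins deux cases noires
--     #On décale de 1 a chaque fois par exemple notre région à [1,2,3,4] On va d'abord avoir
--     # [1,2,3] puis [2,3,4] puis [3,4,1] et [4,1,2] donc on a tout les groupes de clauses
--     #ou il manque un élèment a chaque fois, si une clauses n'est pas bonne alors on n'a
--     #pas assez de cases noires
--     l = len(region)
--     t = []
--     for i in range(l):
--         tab = []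
--         for j in range(i, i+l-1): # On décales de 1 pour commencer à une nouvelle variable
--             tab.append(region[j % l]) #on veut les elements de la region donc si on dépasse le nombre de région au fait le modulo
--         t.append(tab)
--     return t
-- ===== SOURCE B (Python) =====
-- def au_moins_deux_case(region):
--     l = len(region)
--     doubled = region + region
--     return [doubled[i:i+l-1] for i in range(l)]
-- ===== Notes on version B (the rewrite author's own statement) =====
-- stated objective: idiomatic
-- what changed: B precomputes a doubled buffer region+region once and takes each rotated window as one contiguous slice doubled[i:i+l-1], eliminating the inner element-by-element loop with modular indexing.
import Mathlib
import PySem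

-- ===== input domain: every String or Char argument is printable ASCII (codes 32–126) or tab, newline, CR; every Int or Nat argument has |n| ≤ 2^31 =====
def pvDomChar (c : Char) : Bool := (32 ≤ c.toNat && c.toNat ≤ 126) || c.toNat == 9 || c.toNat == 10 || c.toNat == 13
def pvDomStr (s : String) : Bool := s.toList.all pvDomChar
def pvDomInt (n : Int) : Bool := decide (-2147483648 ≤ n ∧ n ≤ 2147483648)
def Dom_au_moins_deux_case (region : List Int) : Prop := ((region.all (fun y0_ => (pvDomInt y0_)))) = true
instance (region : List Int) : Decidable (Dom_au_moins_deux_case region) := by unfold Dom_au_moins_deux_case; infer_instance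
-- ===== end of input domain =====

-- B builds each rotated window as one contiguous slice of a doubled buffer instead of an inner loop with modular indexing (idiomatic; return-value equivalence, no mutation involved).
-- ===== PORT A =====
def au_moins_deux_case (region : List Int) : List (List Int) :=
  let l : Int := region.length
  (PySem.List.pyRange 0 l 1).foldl (fun t i =>
    let tab := (PySem.List.pyRange i (i + l - 1) 1).foldl
      (fun tab j => tab ++ [PySem.List.pyGetD region (PySem.Int.mod j l) 0]) []
    t ++ [tab]) []

-- ===== PORT B =====
def au_moins_deux_case_alt (region : List Int) : List (List Int) :=
  let l : Int := region.length
  let doubled := region ++ region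
  (PySem.List.pyRange 0 l 1).map (fun i =>
    PySem.List.slice doubled (some i) (some (i + l - 1)))

-- ===== PRECONDITION & SPEC =====
def Spec_au_moins_deux_case (region : List Int) (out : List (List Int)) : Prop := out = au_moins_deux_case_alt region
instance (region : List Int) (out : List (List Int)) : Decidable (Spec_au_moins_deux_case region out) := by unfold Spec_au_moins_deux_case; infer_instance

-- ===== CLAIM (what is proved, stated in full; the proofs are below) =====
def Claim_equal_au_moins_deux_case : Prop := ∀ (region : List Int), Dom_au_moins_deux_case region → Spec_au_moins_deux_case region (au_moins_deux_case region)

-- ===== LEMMAS AND PROOFS =====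

-- ===== VERDICT (by name: the statement is the Claim_ definition above) =====
-- one window: A's inner modular loop equals B's contiguous slice of the doubled buffer
lemma window_eq (region : List Int) (i : Nat) (hi : i < region.length) :
    ((PySem.List.pyRange (i : Int) ((i : Int) + (region.length : Int) - 1) 1).map
      (fun j => PySem.List.pyGetD region (PySem.Int.mod j (region.length : Int)) 0))
    = PySem.List.slice (region ++ region) (some (i : Int))
        (some ((i : Int) + (region.length : Int) - 1)) := by
  set n := region.length with hn
  have h1 : 1 ≤ n := by omega
  have hcast : (i : Int) + (n : Int) - 1 = (i : Int) + ((n - 1 : Nat) : Int) := by omega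
  rw [hcast, PySem.List.slice_natCast_add, PySem.List.pyRange_one]
  have hlen : (((i : Int) + ((n - 1 : Nat) : Int)) - (i : Int)).toNat = n - 1 := by omega
  rw [hlen]
  apply List.ext_getElem
  · simp
    omega
  · intro k hk1 hk2
    simp only [List.getElem_map, List.getElem_range, List.getElem_take, List.getElem_drop]
    simp only [List.length_map, List.length_range] at hk1
    have hik : ((i : Int) + (k : Int)) = ((i + k : Nat) : Int) := by push_cast; ring
    rw [hik, PySem.Int.mod_natCast, PySem.List.pyGetD_natCast]
    have hlt : i + k < 2 * n := by omega
    by_cases hc : i + k < n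
    · rw [Nat.mod_eq_of_lt hc]
      rw [List.getElem_append_left (by omega), List.getD_eq_getElem region 0 (by omega)]
    · have : (i + k) % n = i + k - n := by
        rw [Nat.mod_eq_sub_mod (by omega), Nat.mod_eq_of_lt (by omega)]
      rw [this, List.getElem_append_right (by omega), List.getD_eq_getElem region 0 (by omega)]

theorem au_moins_deux_case_spec : Claim_equal_au_moins_deux_case := by
  intro region _
  unfold Spec_au_moins_deux_case au_moins_deux_case au_moins_deux_case_alt
  simp only [PySem.List.foldl_append_singleton_eq_map, List.nil_append]
  apply List.map_congr_left
  intro i hi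
  rw [PySem.List.mem_pyRange_one] at hi
  obtain ⟨h0, h1⟩ := hi
  have hin : i.toNat < region.length := by omega
  have hi' : (i.toNat : Int) = i := by omega
  rw [← hi', window_eq region i.toNat hin]
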